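-- pv_equiv track=rewrite | github.com/thoriumrobot/PTML | gptreann/predict_generics.py | tokenize_preserving_generics
-- ===== SOURCE A (Python) =====
-- def tokenize_preserving_generics(s):
--     """
--     Tokenize a string by whitespace, but merge consecutive tokens if we're inside <...> depth.
--     Also merges them if they come consecutively while that depth is > 0.
--
--     This way "List < String >" => ["List<String>"] rather than ["List", "<", "String", ">"].
--     Example:
--        "final List < String >[] data"
--     =>  ["final", "List<String>[]", "data"]
--     """
--     parts = s.strip().split()
--     tokens = []
--     buffer = []
--     depth = 0
--
--     for p in parts:
--         # Add p to buffer
--         # Update depth by counting < and >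
--         # We'll do it character by character so multiple < > in the same token are handled.
--         had_lt_gt = False
--         for ch in p:
--             if ch == '<':
--                 depth += 1
--                 had_lt_gt = True
--             elif ch == '>':
--                 had_lt_gt = True
--                 if depth > 0:
--                     depth -= 1
--
--         buffer.append(p)
--
--         # If depth is zero after adding this piece,
--         # we finalize the buffer as one token
--         if depth == 0:
--             merged = " ".join(buffer)
--             # If we had < or > anywhere, let's remove internal spaces
--             # E.g. "List < String >[]" => "List<String>[]"
--             if had_lt_gt:
--                 merged = remove_spaces_in_angle_brackets(merged)
--             tokens.append(merged)
--             buffer = []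
--
--     # leftover
--     if buffer:
--         merged = " ".join(buffer)
--         merged = remove_spaces_in_angle_brackets(merged)
--         tokens.append(merged)
--
--     return tokens
--
-- def remove_spaces_in_angle_brackets(s):
--     """
--     Remove all spaces between < and > pairs. Also handle nested generics.
--     E.g. "List < String >" => "List<String>"
--          "Map < String , List < Integer >>" => "Map<String,List<Integer>>"
--     """
--     out = []
--     depth = 0
--     for ch in s:
--         if ch == '<':
--             depth += 1
--             out.append(ch)
--         elif ch == '>':
--             out.append(ch)
--             if depth > 0:
--                 depth -= 1
--         else:
--             if not (ch.isspace() and depth > 0):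
--                 out.append(ch)
--     return "".join(out)
-- ===== SOURCE B (Python) =====
-- def tokenize_preserving_generics(s):
--     # Single character-level scan: depth>0 whitespace is dropped, depth==0
--     # whitespace is a token boundary; '>' never drives depth below 0.
--     tokens = []
--     buf = []
--     depth = 0
--     for ch in s:
--         if ch == '<':
--             depth += 1
--             buf.append(ch)
--         elif ch == '>':
--             buf.append(ch)
--             if depth > 0:
--                 depth -= 1
--         elif ch.isspace():
--             if depth == 0:
--                 if buf:
--                     tokens.append(''.join(buf))
--                     buf = []
--         else:
--             buf.append(ch)
--     if buf:
--         tokens.append(''.join(buf))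
--     return tokens
-- ===== Notes on version B (the rewrite author's own statement) =====
-- stated objective: simpler
-- what changed: Replaces A's split-into-words pipeline (per-word depth/had_lt_gt loop, space-join of a buffer, and a separate remove_spaces_in_angle_brackets pass) by one character-level scan that keeps a depth counter and a current-token buffer, dropping whitespace inside angle brackets and cutting tokens at depth-0 whitespace.
import Mathlib
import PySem

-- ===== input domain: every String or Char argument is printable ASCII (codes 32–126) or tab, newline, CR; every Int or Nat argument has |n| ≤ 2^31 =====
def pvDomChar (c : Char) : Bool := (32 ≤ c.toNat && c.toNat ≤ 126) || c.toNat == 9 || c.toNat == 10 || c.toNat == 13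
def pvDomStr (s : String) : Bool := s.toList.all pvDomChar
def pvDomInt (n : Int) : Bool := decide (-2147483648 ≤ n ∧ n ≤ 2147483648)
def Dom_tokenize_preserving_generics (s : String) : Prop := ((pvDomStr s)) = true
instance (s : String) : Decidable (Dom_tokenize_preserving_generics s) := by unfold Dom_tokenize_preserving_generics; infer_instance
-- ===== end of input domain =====

-- B replaces A's split/merge/remove-spaces pipeline by one character-level scan (simpler, same result).

-- ===== PORT A =====
-- helper remove_spaces_in_angle_brackets: fold with state (out, depth)
def pvRSStep (st : List Char × Nat) (ch : Char) : List Char × Nat :=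
  if ch = '<' then (st.1 ++ [ch], st.2 + 1)
  else if ch = '>' then (st.1 ++ [ch], if st.2 > 0 then st.2 - 1 else st.2)
  else if PySem.Chars.isspace ch && decide (st.2 > 0) then st
  else (st.1 ++ [ch], st.2)

def pvRemoveSpaces (s : List Char) : List Char :=
  (s.foldl pvRSStep ([], 0)).1

-- inner char loop of A: state (depth, had_lt_gt)
def pvLtGtStep (st : Nat × Bool) (ch : Char) : Nat × Bool :=
  if ch = '<' then (st.1 + 1, true)
  else if ch = '>' then ((if st.1 > 0 then st.1 - 1 else st.1), true)
  else st

-- main loop of A over parts, state (tokens, buffer, depth)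
def pvAGo : List (List Char) → List (List Char) → List (List Char) → Nat → List (List Char)
  | [], tokens, buffer, _ =>
      if buffer.isEmpty then tokens
      else tokens ++ [pvRemoveSpaces (PySem.Chars.join [' '] buffer)]
  | p :: ps, tokens, buffer, depth =>
      let dh := p.foldl pvLtGtStep (depth, false)
      let buffer' := buffer ++ [p]
      if dh.1 = 0 then
        let merged := PySem.Chars.join [' '] buffer'
        let merged := if dh.2 then pvRemoveSpaces merged else merged
        pvAGo ps (tokens ++ [merged]) [] 0
      else
        pvAGo ps tokens buffer' dh.1

def tokenize_preserving_generics (s : String) : List String :=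
  (pvAGo (PySem.Chars.split₀ (PySem.Chars.strip s.toList)) [] [] 0).map String.ofList

-- ===== PORT B =====
-- single scan over the characters, state (buf, depth)
def pvBGo : List Char → List Char → Nat → List (List Char)
  | [], buf, _ => if buf.isEmpty then [] else [buf]
  | c :: cs, buf, depth =>
      if c = '<' then pvBGo cs (buf ++ [c]) (depth + 1)
      else if c = '>' then pvBGo cs (buf ++ [c]) (if depth > 0 then depth - 1 else depth)
      else if PySem.Chars.isspace c then
        if depth = 0 then
          if buf.isEmpty then pvBGo cs buf depth
          else buf :: pvBGo cs [] depth
        else pvBGo cs buf depth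
      else pvBGo cs (buf ++ [c]) depth

def tokenize_preserving_generics_alt (s : String) : List String :=
  (pvBGo s.toList [] 0).map String.ofList

-- ===== PRECONDITION & SPEC =====
def Spec_tokenize_preserving_generics (s : String) (out : List String) : Prop := out = tokenize_preserving_generics_alt s
instance (s : String) (out : List String) : Decidable (Spec_tokenize_preserving_generics s out) := by unfold Spec_tokenize_preserving_generics; infer_instance

-- ===== CLAIM (what is proved, stated in full; the proofs are below) =====
def Claim_equal_tokenize_preserving_generics : Prop := ∀ (s : String), Dom_tokenize_preserving_generics s → Spec_tokenize_preserving_generics s (tokenize_preserving_generics s)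

-- ===== LEMMAS AND PROOFS =====

-- depth of angle brackets after reading p, floored at 0 (the common bookkeeping of both programs)
def pvDStep (d : Nat) (ch : Char) : Nat :=
  if ch = '<' then d + 1 else if ch = '>' then (if d > 0 then d - 1 else d) else d

def pvDepth (d : Nat) (p : List Char) : Nat := p.foldl pvDStep d

-- common specification: process whitespace-free words, concatenating while depth > 0
def pvSpec : List (List Char) → List Char → Nat → List (List Char)
  | [], g, _ => if g = [] then [] else [g]
  | p :: ps, g, d =>
      if pvDepth d p = 0 then (g ++ p) :: pvSpec ps [] 0 else pvSpec ps (g ++ p) (pvDepth d p)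

def NoSpace (p : List Char) : Prop := ∀ c ∈ p, PySem.Chars.isspace c = false

theorem pvDepth_append (d : Nat) (p q : List Char) :
    pvDepth d (p ++ q) = pvDepth (pvDepth d p) q := by
  simp [pvDepth, List.foldl_append]

theorem pvLtGt_eq (p : List Char) (d : Nat) (h : Bool) :
    p.foldl pvLtGtStep (d, h) = (pvDepth d p, h || p.any (fun c => c = '<' || c = '>')) := by
  induction p generalizing d h with
  | nil => simp [pvDepth]
  | cons c p ih =>
    simp only [List.foldl_cons, List.any_cons]
    rw [ih]
    by_cases h1 : c = '<' <;> by_cases h2 : c = '>' <;>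
      simp [pvLtGtStep, pvDepth, pvDStep, h1, h2]

theorem pvDepth_no_angle (p : List Char) (d : Nat)
    (h : p.any (fun c => c = '<' || c = '>') = false) : pvDepth d p = d := by
  induction p generalizing d with
  | nil => simp [pvDepth]
  | cons c p ih =>
    simp only [List.any_cons, Bool.or_eq_false_iff, decide_eq_false_iff_not] at h
    simp [pvDepth, List.foldl_cons, pvDStep, h.1.1, h.1.2]
    exact ih d h.2

theorem pvRS_nospace (p : List Char) (out : List Char) (d : Nat) (h : NoSpace p) :
    p.foldl pvRSStep (out, d) = (out ++ p, pvDepth d p) := by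
  induction p generalizing out d with
  | nil => simp [pvDepth]
  | cons c p ih =>
    have hc : PySem.Chars.isspace c = false := h c (by simp)
    have h' : NoSpace p := fun x hx => h x (by simp [hx])
    by_cases h1 : c = '<' <;> by_cases h2 : c = '>' <;>
      simp [List.foldl_cons, pvRSStep, pvDepth, pvDStep, h1, h2, hc, ih _ _ h']

theorem pvJoin_append (bs : List (List Char)) (p : List Char) (h : bs ≠ []) :
    PySem.Chars.join [' '] (bs ++ [p]) = PySem.Chars.join [' '] bs ++ ' ' :: p := by
  induction bs with
  | nil => exact absurd rfl h
  | cons b bs ih =>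
    cases bs with
    | nil => simp [PySem.Chars.join_cons_cons, PySem.Chars.join_singleton]
    | cons b2 bs2 =>
      have e : (b :: b2 :: bs2) ++ [p] = b :: b2 :: (bs2 ++ [p]) := by simp
      rw [e, PySem.Chars.join_cons_cons,
        show b2 :: (bs2 ++ [p]) = (b2 :: bs2) ++ [p] by simp,
        ih (by simp), PySem.Chars.join_cons_cons]
      simp

theorem pvStageA (ps : List (List Char)) (tokens buffer : List (List Char)) (d : Nat)
    (hps : ∀ p ∈ ps, NoSpace p ∧ p ≠ [])
    (hbufS : ∀ b ∈ buffer, NoSpace b) (hbufN : ∀ b ∈ buffer, b ≠ [])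
    (hiff : buffer = [] ↔ d = 0)
    (hinv : (PySem.Chars.join [' '] buffer).foldl pvRSStep ([], 0) = (buffer.flatten, d)) :
    pvAGo ps tokens buffer d = tokens ++ pvSpec ps buffer.flatten d := by
  induction ps generalizing tokens buffer d with
  | nil =>
    by_cases hb : buffer = []
    · subst hb; simp [pvAGo, pvSpec]
    · have hfl : buffer.flatten ≠ [] := by
        cases buffer with
        | nil => exact absurd rfl hb
        | cons b bs =>
          have := hbufN b (by simp)
          simp [List.flatten_cons]
          intro hb0; exact absurd hb0 this
      have hrs : pvRemoveSpaces (PySem.Chars.join [' '] buffer) = buffer.flatten := by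
        simp [pvRemoveSpaces, hinv]
      simp [pvAGo, pvSpec, hb, hfl, hrs, List.isEmpty_iff]
  | cons p ps ih =>
    have hpS : NoSpace p := (hps p (by simp)).1
    have hpN : p ≠ [] := (hps p (by simp)).2
    have hps' : ∀ q ∈ ps, NoSpace q ∧ q ≠ [] := fun q hq => hps q (by simp [hq])
    have hdh : p.foldl pvLtGtStep (d, false) = (pvDepth d p, p.any (fun c => c = '<' || c = '>')) := by
      rw [pvLtGt_eq]; simp
    by_cases hd' : pvDepth d p = 0
    · -- flush
      have htok : (if p.any (fun c => c = '<' || c = '>') then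
            pvRemoveSpaces (PySem.Chars.join [' '] (buffer ++ [p]))
          else PySem.Chars.join [' '] (buffer ++ [p])) = buffer.flatten ++ p := by
        by_cases hb : buffer = []
        · subst hb
          have hiffd : d = 0 := hiff.mp rfl
          have hone : PySem.Chars.join [' '] ([] ++ [p]) = p := by
            simp [PySem.Chars.join_singleton]
          rw [hone]
          have : pvRemoveSpaces p = p := by
            simp [pvRemoveSpaces, pvRS_nospace p [] 0 hpS]
          simp [this]
        · have hd0 : d ≠ 0 := fun h0 => hb (hiff.mpr h0)
          have hhad : p.any (fun c => c = '<' || c = '>') = true := by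
            by_contra hcon
            exact hd0 ((pvDepth_no_angle p d (Bool.eq_false_iff.mpr hcon)).symm.trans hd')
          rw [hhad]
          simp only [if_true]
          rw [pvJoin_append buffer p hb]
          unfold pvRemoveSpaces
          rw [show PySem.Chars.join [' '] buffer ++ ' ' :: p
              = (PySem.Chars.join [' '] buffer ++ [' ']) ++ p by simp]
          rw [List.foldl_append, List.foldl_append, hinv]
          have hsp : pvRSStep (buffer.flatten, d) ' ' = (buffer.flatten, d) := by
            have : PySem.Chars.isspace ' ' = true := by decide
            simp [pvRSStep, this, Nat.pos_of_ne_zero hd0]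
          simp only [List.foldl_cons, List.foldl_nil, hsp]
          rw [pvRS_nospace p _ d hpS]
      have hstep : pvAGo (p :: ps) tokens buffer d
          = pvAGo ps (tokens ++ [buffer.flatten ++ p]) [] 0 := by
        rw [pvAGo]
        simp only [hdh]
        rw [if_pos hd', htok]
      rw [hstep, ih _ _ _ (by intro q hq; exact hps' q hq) (by intro b hb; cases hb)
        (by intro b hb; cases hb) (by simp) (by simp [PySem.Chars.join_nil])]
      simp [pvSpec, hd']
    · -- keep accumulating
      have hstep : pvAGo (p :: ps) tokens buffer d
          = pvAGo ps tokens (buffer ++ [p]) (pvDepth d p) := by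
        rw [pvAGo]
        simp only [hdh]
        rw [if_neg hd']
      have hinv' : (PySem.Chars.join [' '] (buffer ++ [p])).foldl pvRSStep ([], 0)
          = ((buffer ++ [p]).flatten, pvDepth d p) := by
        by_cases hb : buffer = []
        · subst hb
          have hiffd : d = 0 := hiff.mp rfl
          subst hiffd
          have hone : PySem.Chars.join [' '] ([] ++ [p]) = p := by
            simp [PySem.Chars.join_singleton]
          rw [hone, pvRS_nospace p [] 0 hpS]
          simp
        · have hd0 : d ≠ 0 := fun h0 => hb (hiff.mpr h0)
          rw [pvJoin_append buffer p hb]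
          rw [show PySem.Chars.join [' '] buffer ++ ' ' :: p
              = (PySem.Chars.join [' '] buffer ++ [' ']) ++ p by simp]
          rw [List.foldl_append, List.foldl_append, hinv]
          have hsp : pvRSStep (buffer.flatten, d) ' ' = (buffer.flatten, d) := by
            have : PySem.Chars.isspace ' ' = true := by decide
            simp [pvRSStep, this, Nat.pos_of_ne_zero hd0]
          simp only [List.foldl_cons, List.foldl_nil, hsp]
          rw [pvRS_nospace p _ d hpS]
          simp
      rw [hstep, ih _ _ _ hps'
        (by intro b hb; rcases List.mem_append.mp hb with h | h
            · exact hbufS b h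
            · simp at h; subst h; exact hpS)
        (by intro b hb; rcases List.mem_append.mp hb with h | h
            · exact hbufN b h
            · simp at h; subst h; exact hpN)
        (by constructor
            · intro h; exact absurd h (by simp)
            · intro h; exact absurd h hd')
        hinv']
      simp [pvSpec, hd']

theorem pvGoAcc (cs : List Char) (cur : List Char) (acc : List (List Char)) :
    PySem.Chars.split₀.go cs cur acc = acc.reverse ++ PySem.Chars.split₀.go cs cur [] := by
  induction cs generalizing cur acc with
  | nil =>
    rw [PySem.Chars.split₀.go, PySem.Chars.split₀.go]
    by_cases hc : cur.isEmpty <;> simp [hc]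
  | cons c cs ih =>
    rw [PySem.Chars.split₀.go, PySem.Chars.split₀.go]
    by_cases hsp : PySem.Chars.isspace c
    · rw [if_pos hsp, if_pos hsp]
      by_cases hc : cur.isEmpty
      · rw [if_pos hc, if_pos hc, ih [] acc]
      · rw [if_neg hc, if_neg hc, ih [] (cur.reverse :: acc), ih [] [cur.reverse]]
        simp
    · rw [if_neg hsp, if_neg hsp, ih (c :: cur) acc]

theorem pvWords (cs : List Char) (cur : List Char) (acc : List (List Char))
    (hcur : NoSpace cur) (hacc : ∀ w ∈ acc, w ≠ [] ∧ NoSpace w) :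
    ∀ w ∈ PySem.Chars.split₀.go cs cur acc, w ≠ [] ∧ NoSpace w := by
  induction cs generalizing cur acc with
  | nil =>
    intro w hw
    rw [PySem.Chars.split₀.go] at hw
    by_cases hc : cur.isEmpty
    · rw [if_pos hc] at hw
      exact hacc w (List.mem_reverse.mp hw)
    · rw [if_neg hc] at hw
      rcases List.mem_cons.mp (List.mem_reverse.mp hw) with rfl | h
      · constructor
        · simpa [List.isEmpty_iff] using hc
        · intro x hx; exact hcur x (List.mem_reverse.mp hx)
      · exact hacc w h
  | cons c cs ih =>
    intro w hw
    rw [PySem.Chars.split₀.go] at hw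
    by_cases hsp : PySem.Chars.isspace c
    · rw [if_pos hsp] at hw
      by_cases hc : cur.isEmpty
      · rw [if_pos hc] at hw
        exact ih [] acc (by intro x hx; cases hx) hacc w hw
      · rw [if_neg hc] at hw
        refine ih [] _ (by intro x hx; cases hx) ?_ w hw
        intro v hv
        rcases List.mem_cons.mp hv with rfl | hv
        · constructor
          · simpa [List.isEmpty_iff] using hc
          · intro x hx; exact hcur x (List.mem_reverse.mp hx)
        · exact hacc v hv
    · rw [if_neg hsp] at hw
      refine ih (c :: cur) acc ?_ hacc w hw
      intro x hx
      rcases List.mem_cons.mp hx with rfl | hx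
      · simpa using hsp
      · exact hcur x hx

theorem pvStageB (cs : List Char) (cur g : List Char) (d : Nat)
    (hcur : NoSpace cur) (hg : g ≠ [] → d ≠ 0) :
    pvBGo cs (g ++ cur) (pvDepth d cur) = pvSpec (PySem.Chars.split₀.go cs cur.reverse []) g d := by
  induction cs generalizing cur g d with
  | nil =>
    rw [PySem.Chars.split₀.go]
    by_cases hc : cur = []
    · subst hc
      simp only [List.isEmpty_nil, List.reverse_nil, if_true, List.reverse_nil]
      by_cases hgn : g = []
      · subst hgn; simp [pvBGo, pvSpec, pvDepth]
      · simp [pvBGo, pvSpec, pvDepth, hgn, List.isEmpty_iff]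
    · have hcE : cur.reverse.isEmpty = false := by
        simp [List.isEmpty_iff, hc]
      simp only [hcE, Bool.false_eq_true, if_false, List.reverse_reverse]
      have hne : g ++ cur ≠ [] := by simp [hc]
      by_cases hd' : pvDepth d cur = 0 <;>
        simp [pvBGo, pvSpec, hd', List.isEmpty_iff, hne, hc]
  | cons c cs ih =>
    rw [PySem.Chars.split₀.go]
    by_cases h1 : c = '<'
    · subst h1
      have hsp : PySem.Chars.isspace '<' = false := by decide
      have hstep : pvDepth d (cur ++ ['<']) = pvDepth d cur + 1 := by
        rw [pvDepth_append]; simp [pvDepth, pvDStep]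
      have := ih (cur ++ ['<']) g d
        (by intro x hx; rcases List.mem_append.mp hx with h | h
            · exact hcur x h
            · simp at h; subst h; exact hsp) hg
      rw [hstep] at this
      simp only [hsp, Bool.false_eq_true, if_false]
      rw [pvBGo]
      simp only [if_pos rfl]
      rw [← List.append_assoc] at this
      rw [this]
      simp
    · by_cases h2 : c = '>'
      · subst h2
        have hsp : PySem.Chars.isspace '>' = false := by decide
        have hstep : pvDepth d (cur ++ ['>'])
            = (if pvDepth d cur > 0 then pvDepth d cur - 1 else pvDepth d cur) := by
          rw [pvDepth_append]; simp [pvDepth, pvDStep]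
        have := ih (cur ++ ['>']) g d
          (by intro x hx; rcases List.mem_append.mp hx with h | h
              · exact hcur x h
              · simp at h; subst h; exact hsp) hg
        rw [hstep] at this
        simp only [hsp, Bool.false_eq_true, if_false]
        rw [pvBGo]
        simp only [if_neg (by decide : ¬('>' = '<')), if_pos rfl]
        rw [← List.append_assoc] at this
        rw [this]
        simp
      · by_cases hsp : PySem.Chars.isspace c
        · -- whitespace
          simp only [hsp, if_true]
          rw [pvBGo]
          simp only [if_neg h1, if_neg h2, hsp, if_true]
          by_cases hc : cur = []
          · subst hc
            simp only [List.isEmpty_nil, if_true, List.reverse_nil]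
            simp only [List.append_nil, pvDepth, List.foldl_nil]
            by_cases hd0 : d = 0
            · subst hd0
              have hgn : g = [] := by
                by_contra hgn; exact hg hgn rfl
              subst hgn
              simp only [List.isEmpty_nil, if_pos rfl, if_true]
              have := ih [] [] 0 (by intro x hx; cases hx) (by simp)
              simpa [pvDepth] using this
            · rw [if_neg hd0]
              have := ih [] g d (by intro x hx; cases hx) hg
              simpa [pvDepth] using this
          · have hcE : cur.reverse.isEmpty = false := by simp [List.isEmpty_iff, hc]
            simp only [hcE, Bool.false_eq_true, if_false]
            rw [pvGoAcc cs [] [cur.reverse.reverse], List.reverse_reverse, List.reverse_singleton]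
            have hspec : pvSpec (cur :: PySem.Chars.split₀.go cs [] []) g d
                = if pvDepth d cur = 0 then (g ++ cur) :: pvSpec (PySem.Chars.split₀.go cs [] []) [] 0
                  else pvSpec (PySem.Chars.split₀.go cs [] []) (g ++ cur) (pvDepth d cur) := by
              rw [pvSpec]
            rw [List.singleton_append, hspec]
            by_cases hd' : pvDepth d cur = 0
            · rw [if_pos hd', hd']
              have hne : (g ++ cur).isEmpty = false := by simp [List.isEmpty_iff, hc]
              simp only [if_pos rfl, hne, Bool.false_eq_true, if_false]
              have := ih [] [] 0 (by intro x hx; cases hx) (by simp)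
              simp only [List.append_nil, pvDepth, List.foldl_nil, List.reverse_nil] at this
              rw [this]
              simp
            · rw [if_neg hd', if_neg hd']
              have := ih [] (g ++ cur) (pvDepth d cur) (by intro x hx; cases hx)
                (fun _ => hd')
              simpa [pvDepth] using this
        · -- ordinary character
          simp only [hsp, Bool.false_eq_true, if_false]
          rw [pvBGo]
          simp only [if_neg h1, if_neg h2, hsp, Bool.false_eq_true, if_false]
          have hstep : pvDepth d (cur ++ [c]) = pvDepth d cur := by
            rw [pvDepth_append]; simp [pvDepth, pvDStep, h1, h2]
          have := ih (cur ++ [c]) g d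
            (by intro x hx; rcases List.mem_append.mp hx with h | h
                · exact hcur x h
                · simp at h; subst h; simpa using hsp) hg
          rw [hstep] at this
          rw [← List.append_assoc] at this
          rw [this]
          simp

theorem pvB_lstrip (cs : List Char) :
    pvBGo (List.dropWhile PySem.Chars.isspace cs) [] 0 = pvBGo cs [] 0 := by
  induction cs with
  | nil => rfl
  | cons c cs ih =>
    by_cases hsp : PySem.Chars.isspace c
    · have h1 : c ≠ '<' := by rintro rfl; exact absurd hsp (by decide)
      have h2 : c ≠ '>' := by rintro rfl; exact absurd hsp (by decide)
      rw [List.dropWhile_cons_of_pos hsp, ih]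
      conv_rhs => rw [pvBGo]
      simp [h1, h2, hsp]
    · rw [List.dropWhile_cons_of_neg (by simp [hsp])]

theorem pvB_allspace (sp : List Char) (hsp : ∀ c ∈ sp, PySem.Chars.isspace c = true) :
    ∀ (buf : List Char) (d : Nat), pvBGo sp buf d = if buf.isEmpty then [] else [buf] := by
  induction sp with
  | nil => intro buf d; rw [pvBGo]
  | cons c sp ih =>
    intro buf d
    have hc : PySem.Chars.isspace c = true := hsp c (by simp)
    have hsp' : ∀ x ∈ sp, PySem.Chars.isspace x = true := fun x hx => hsp x (by simp [hx])
    have h1 : c ≠ '<' := by rintro rfl; exact absurd hc (by decide)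
    have h2 : c ≠ '>' := by rintro rfl; exact absurd hc (by decide)
    rw [pvBGo]
    simp only [h1, h2, hc, if_false, if_true]
    by_cases hd : d = 0
    · subst hd
      by_cases hb : buf.isEmpty
      · simp [hb, ih hsp' buf 0, hb]
      · simp only [hb, Bool.false_eq_true, if_false, if_pos rfl]
        rw [ih hsp' [] 0]
        simp [hb]
    · simp [hd, ih hsp' buf d]

theorem pvB_trailing (sp : List Char) (hsp : ∀ c ∈ sp, PySem.Chars.isspace c = true) :
    ∀ (cs buf : List Char) (d : Nat), pvBGo (cs ++ sp) buf d = pvBGo cs buf d := by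
  intro cs
  induction cs with
  | nil =>
    intro buf d
    simp only [List.nil_append]
    rw [pvB_allspace sp hsp buf d, pvBGo]
  | cons c cs ih =>
    intro buf d
    rw [List.cons_append, pvBGo, pvBGo]
    by_cases h1 : c = '<'
    · simp [h1, ih]
    · by_cases h2 : c = '>'
      · simp [h1, h2, ih]
      · by_cases hc : PySem.Chars.isspace c
        · simp only [h1, h2, hc, if_false, if_true]
          split_ifs <;> simp [ih]
        · simp [h1, h2, hc, ih]

theorem pvB_strip (cs : List Char) :
    pvBGo (PySem.Chars.strip cs) [] 0 = pvBGo cs [] 0 := by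
  unfold PySem.Chars.strip PySem.Chars.rstrip PySem.Chars.lstrip
  set l := List.dropWhile PySem.Chars.isspace cs with hl
  have hdec : l = (List.dropWhile PySem.Chars.isspace l.reverse).reverse
      ++ (List.takeWhile PySem.Chars.isspace l.reverse).reverse := by
    conv_lhs => rw [← List.reverse_reverse l,
      ← List.takeWhile_append_dropWhile (p := PySem.Chars.isspace) (l := l.reverse)]
    rw [List.reverse_append]
  have htr : ∀ c ∈ (List.takeWhile PySem.Chars.isspace l.reverse).reverse,
      PySem.Chars.isspace c = true := by
    intro c hc
    exact List.mem_takeWhile_imp (List.mem_reverse.mp hc)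
  calc pvBGo (List.dropWhile PySem.Chars.isspace l.reverse).reverse [] 0
      = pvBGo ((List.dropWhile PySem.Chars.isspace l.reverse).reverse
          ++ (List.takeWhile PySem.Chars.isspace l.reverse).reverse) [] 0 := by
        rw [pvB_trailing _ htr]
    _ = pvBGo l [] 0 := by rw [← hdec]
    _ = pvBGo cs [] 0 := pvB_lstrip cs

-- ===== VERDICT (by name: the statement is the Claim_ definition above) =====
theorem tokenize_preserving_generics_spec : Claim_equal_tokenize_preserving_generics := by
  intro s _
  unfold Spec_tokenize_preserving_generics tokenize_preserving_generics tokenize_preserving_generics_alt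
  have hA : pvAGo (PySem.Chars.split₀ (PySem.Chars.strip s.toList)) [] [] 0
      = pvSpec (PySem.Chars.split₀ (PySem.Chars.strip s.toList)) [] 0 := by
    have := pvStageA (PySem.Chars.split₀ (PySem.Chars.strip s.toList)) [] [] 0
      (fun p hp => (pvWords _ [] [] (by intro c hc; cases hc) (by intro w hw; cases hw) p hp).symm.imp id id)
      (by intro b hb; cases hb) (by intro b hb; cases hb) (by simp)
      (by rw [PySem.Chars.join_nil]; rfl)
    simpa using this
  have hB : pvBGo s.toList [] 0
      = pvSpec (PySem.Chars.split₀ (PySem.Chars.strip s.toList)) [] 0 := by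
    rw [← pvB_strip]
    have := pvStageB (PySem.Chars.strip s.toList) [] [] 0 (by intro c hc; cases hc) (by simp)
    simpa [PySem.Chars.split₀, pvDepth] using this
  rw [hA, hB]
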